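-- pv_equiv track=rewrite | github.com/dayds/aljalddakggalco | sohds/spring/w7/[boj] 먹을 것인가 먹힐 것인가.py | ab_pair
-- ===== SOURCE A (Python) =====
-- def ab_pair(n, m, a, b):
--     cnt = 0
--     pair = 0
--
--     a.sort()
--     b.sort()
--
--     for i in range(n):
--         while 1:
--             if cnt == m or a[i] <= b[cnt]:
--                 pair += cnt
--                 break
--             else:
--                 cnt += 1
--     return pair
-- ===== SOURCE B (Python) =====
-- def ab_pair(n, m, a, b):
--     # Sorts a and b in place, like the original.
--     a.sort()
--     b.sort()
--     pair = 0
--     for i in range(n):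
--         x = a[i]
--         lo, hi = 0, m
--         while lo < hi:  # hand-rolled bisect_left(b, x, 0, m)
--             mid = (lo + hi) // 2
--             if b[mid] < x:
--                 lo = mid + 1
--             else:
--                 hi = mid
--         pair += lo
--     return pair
-- ===== Notes on version B (the rewrite author's own statement) =====
-- stated objective: alternative
-- what changed: Replaces the stateful monotone two-pointer sweep (a cnt cursor carried across iterations of the outer loop) with an independent bisect_left-style binary search over b[0:m] for each a[i]; it trades the shared cursor for per-element O(log m) searches of similar total cost.
-- outside the precondition, e.g. on ab_pair(1, 5, [1], [10]): A returns 0, B raises IndexError; on ab_pair(1, -2, [0], [1]): A returns 0, B returns 0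
import Mathlib
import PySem

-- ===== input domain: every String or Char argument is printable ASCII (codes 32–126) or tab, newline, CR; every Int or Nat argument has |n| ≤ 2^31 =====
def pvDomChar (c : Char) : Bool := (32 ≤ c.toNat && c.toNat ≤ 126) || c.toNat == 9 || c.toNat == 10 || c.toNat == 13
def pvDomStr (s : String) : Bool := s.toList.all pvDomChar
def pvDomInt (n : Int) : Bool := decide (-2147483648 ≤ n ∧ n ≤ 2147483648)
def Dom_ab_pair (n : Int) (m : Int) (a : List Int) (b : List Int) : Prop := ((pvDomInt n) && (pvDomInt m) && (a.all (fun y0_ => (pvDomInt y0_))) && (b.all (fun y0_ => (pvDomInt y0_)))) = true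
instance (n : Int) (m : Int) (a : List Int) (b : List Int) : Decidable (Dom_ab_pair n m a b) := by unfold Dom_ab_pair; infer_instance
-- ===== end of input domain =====

-- B replaces A's stateful two-pointer sweep by an independent bisect_left binary search over b[0:m]
-- per element (alternative decomposition, similar cost); both sort a and b in place in Python —
-- the equivalence proved here is about the return value (B performs the same mutation).


-- ===== PORT A =====
-- inner 'while 1' loop of A: advances cnt until cnt == m or a[i] <= b[cnt]; none = IndexError on b[cnt]
def abInner (m : Int) (ai : Int) (b' : List Int) (cnt : Nat) : Option Nat :=
  if (cnt : Int) = m then some cnt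
  else
    match h : PySem.List.pyGet? b' (cnt : Int) with
    | none => none
    | some bc => if ai ≤ bc then some cnt else abInner m ai b' (cnt + 1)
termination_by b'.length - cnt
decreasing_by
  rw [PySem.List.pyGet?_natCast] at h
  obtain ⟨hlt, -⟩ := List.getElem?_eq_some_iff.mp h
  omega

def ab_pair (n : Int) (m : Int) (a : List Int) (b : List Int) : Int :=
  -- a.sort(); b.sort() — in-place sort, ported by reading the sorted lists below
  match (PySem.List.pyRange 0 n).foldl
      (fun st i => st.bind (fun cp =>
        match PySem.List.pyGet? (PySem.List.sorted a (fun x => x)) i with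
        | none => none
        | some ai => (abInner m ai (PySem.List.sorted b (fun x => x)) cp.1).map
            (fun c => (c, cp.2 + (c : Int)))))
      (some ((0 : Nat), (0 : Int))) with
  | some cp => cp.2
  | none => 0   -- unreachable under Pre_ (Python raises IndexError there)

-- ===== PORT B =====
-- B's hand-written bisect_left loop: while lo < hi: mid = (lo+hi)//2; if b[mid] < x: lo = mid+1 else hi = mid
-- (b[mid] ported via pyGet?; getD 0 is unreachable under Pre_, where 0 ≤ lo ≤ mid < hi ≤ len b)
def bsLoop (b' : List Int) (x : Int) (lo hi : Int) : Int :=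
  if _h : lo < hi then
    let mid := PySem.Int.floordiv (lo + hi) 2
    if (PySem.List.pyGet? b' mid).getD 0 < x then bsLoop b' x (mid + 1) hi
    else bsLoop b' x lo mid
  else lo
termination_by (hi - lo).toNat
decreasing_by
  · have hb := PySem.Int.floordiv_two_mid_bounds (le_of_lt _h)
    omega
  · have hb := PySem.Int.floordiv_two_mid_bounds (le_of_lt _h)
    have hlt : PySem.Int.floordiv (lo + hi) 2 < hi :=
      (PySem.Int.floordiv_lt_iff_lt_mul (by omega)).mpr (by omega)
    omega

def ab_pair_alt (n : Int) (m : Int) (a : List Int) (b : List Int) : Int :=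
  -- a.sort(); b.sort(), then the bisect loop per element of sorted a
  (PySem.List.pyRange 0 n).foldl
    (fun pair i => pair + bsLoop (PySem.List.sorted b (fun x => x))
      ((PySem.List.pyGet? (PySem.List.sorted a (fun x => x)) i).getD 0) 0 m) 0

-- ===== PRECONDITION & SPEC =====
-- Pre_ excludes n > len(a) (IndexError on a[i]) and, for positive n, m outside [0, len(b)]:
-- there A raises IndexError on most inputs and on the rest returns a value that depends on how far
-- the scan of b happens to run past the stated bound m, while B's search bounded by hi=m raises or returns 0.
def Pre_ab_pair (n : Int) (m : Int) (a : List Int) (b : List Int) : Prop :=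
  n ≤ (a.length : Int) ∧ (0 < n → 0 ≤ m ∧ m ≤ (b.length : Int))
instance (n : Int) (m : Int) (a : List Int) (b : List Int) : Decidable (Pre_ab_pair n m a b) := by
  unfold Pre_ab_pair; infer_instance

def pvWitness_ab_pair : Int × Int × List Int × List Int := (3, 2, [5, 1, 4], [2, 6])

def Spec_ab_pair (n : Int) (m : Int) (a : List Int) (b : List Int) (out : Int) : Prop := out = ab_pair_alt n m a b
instance (n : Int) (m : Int) (a : List Int) (b : List Int) (out : Int) : Decidable (Spec_ab_pair n m a b out) := by unfold Spec_ab_pair; infer_instance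

-- ===== CLAIM (what is proved, stated in full; the proofs are below) =====
def Claim_equal_ab_pair : Prop := ∀ (n : Int) (m : Int) (a : List Int) (b : List Int), Dom_ab_pair n m a b → Pre_ab_pair n m a b → Spec_ab_pair n m a b (ab_pair n m a b)

-- ===== LEMMAS AND PROOFS =====

-- list element at a Nat index, defaulting to 0 (only used with the index in range)
def gel (c : List Int) (j : Nat) : Int := c.getD j 0

theorem pyGet?_of_lt {c : List Int} {j : Nat} (hj : j < c.length) :
    PySem.List.pyGet? c (j : Int) = some (gel c j) := by
  rw [PySem.List.pyGet?_natCast]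
  simp [gel, List.getD_eq_getElem?_getD, List.getElem?_eq_getElem hj]

theorem gel_mono {c : List Int} (hs : List.Pairwise (· ≤ ·) c) {j k : Nat}
    (hjk : j ≤ k) (hk : k < c.length) : gel c j ≤ gel c k := by
  rcases Nat.lt_or_ge j k with h | h
  · have := List.pairwise_iff_getElem.mp hs j k (by omega) hk h
    simpa [gel, List.getD_eq_getElem?_getD, List.getElem?_eq_getElem, hk,
      show j < c.length by omega] using this
  · have : j = k := by omega
    subst this; rfl

theorem bs_spec (c : List Int) (hs : List.Pairwise (· ≤ ·) c) (x : Int) :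
    ∀ (k : Nat) (lo hi : Int), (hi - lo).toNat ≤ k → 0 ≤ lo → lo ≤ hi → hi ≤ (c.length : Int) →
      lo ≤ bsLoop c x lo hi ∧ bsLoop c x lo hi ≤ hi ∧
      (∀ j : Nat, lo ≤ (j : Int) → (j : Int) < bsLoop c x lo hi → gel c j < x) ∧
      (∀ j : Nat, bsLoop c x lo hi ≤ (j : Int) → (j : Int) < hi → x ≤ gel c j) := by
  intro k
  induction k with
  | zero =>
    intro lo hi hk h0 hlh hhl
    have hlo : hi = lo := by omega
    rw [bsLoop]
    simp only [show ¬ lo < hi by omega, dif_neg, not_false_iff]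
    refine ⟨le_refl _, by omega, ?_, ?_⟩ <;> intro j h1 h2 <;> omega
  | succ k ih =>
    intro lo hi hk h0 hlh hhl
    by_cases hlt : lo < hi
    · rw [bsLoop]
      simp only [dif_pos hlt]
      have hb := PySem.Int.floordiv_two_mid_bounds (le_of_lt hlt)
      set mid := PySem.Int.floordiv (lo + hi) 2 with hmid
      have hmh : mid < hi := (PySem.Int.floordiv_lt_iff_lt_mul (by omega)).mpr (by omega)
      have hmn : 0 ≤ mid := by omega
      have hmNat : ((mid.toNat : Nat) : Int) = mid := Int.toNat_of_nonneg hmn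
      have hmlen : mid.toNat < c.length := by omega
      have hget : (PySem.List.pyGet? c mid).getD 0 = gel c mid.toNat := by
        rw [← hmNat, pyGet?_of_lt hmlen]; rfl
      rw [hget]
      by_cases hc : gel c mid.toNat < x
      · simp only [if_pos hc]
        obtain ⟨i1, i2, i3, i4⟩ := ih (mid + 1) hi (by omega) (by omega) (by omega) hhl
        refine ⟨by omega, i2, ?_, ?_⟩
        · intro j h1 h2
          by_cases hj : mid + 1 ≤ (j : Int)
          · exact i3 j hj h2
          · have hjm : j ≤ mid.toNat := by omega
            exact lt_of_le_of_lt (gel_mono hs hjm hmlen) hc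
        · intro j h1 h2
          exact i4 j h1 h2
      · simp only [if_neg hc]
        push_neg at hc
        obtain ⟨i1, i2, i3, i4⟩ := ih lo mid (by omega) h0 (by omega) (by omega)
        refine ⟨i1, by omega, ?_, ?_⟩
        · intro j h1 h2
          exact i3 j h1 h2
        · intro j h1 h2
          by_cases hj : (j : Int) < mid
          · exact i4 j h1 hj
          · have hjm : mid.toNat ≤ j := by omega
            have hjlen : j < c.length := by omega
            exact le_trans hc (gel_mono hs hjm hjlen)
    · rw [bsLoop]
      simp only [dif_neg hlt]
      refine ⟨le_refl _, hlh, ?_, ?_⟩ <;> intro j h1 h2 <;> omega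

theorem bs_spec0 (c : List Int) (hs : List.Pairwise (· ≤ ·) c) (x : Int) {m : Int}
    (hm0 : 0 ≤ m) (hml : m ≤ (c.length : Int)) :
    0 ≤ bsLoop c x 0 m ∧ bsLoop c x 0 m ≤ m ∧
    (∀ j : Nat, (j : Int) < bsLoop c x 0 m → gel c j < x) ∧
    (∀ j : Nat, bsLoop c x 0 m ≤ (j : Int) → (j : Int) < m → x ≤ gel c j) := by
  obtain ⟨i1, i2, i3, i4⟩ := bs_spec c hs x (m - 0).toNat 0 m le_rfl le_rfl hm0 hml
  exact ⟨i1, i2, fun j h => i3 j (by omega) h, i4⟩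

theorem bs_mono (c : List Int) (hs : List.Pairwise (· ≤ ·) c) {m x y : Int}
    (hm0 : 0 ≤ m) (hml : m ≤ (c.length : Int)) (hxy : x ≤ y) :
    bsLoop c x 0 m ≤ bsLoop c y 0 m := by
  by_contra hcon
  push_neg at hcon
  obtain ⟨hx0, hxm, hx3, hx4⟩ := bs_spec0 c hs x hm0 hml
  obtain ⟨hy0, hym, hy3, hy4⟩ := bs_spec0 c hs y hm0 hml
  set ry := bsLoop c y 0 m
  have hj : ((ry.toNat : Nat) : Int) = ry := Int.toNat_of_nonneg hy0
  have h1 : gel c ry.toNat < x := hx3 ry.toNat (by omega)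
  have h2 : y ≤ gel c ry.toNat := hy4 ry.toNat (by omega) (by omega)
  omega

theorem inner_eq (c : List Int) (hs : List.Pairwise (· ≤ ·) c) {m : Int}
    (hm0 : 0 ≤ m) (hml : m ≤ (c.length : Int)) (x : Int) :
    ∀ (k : Nat) (cnt : Nat), m.toNat - cnt ≤ k → (cnt : Int) ≤ bsLoop c x 0 m →
      abInner m x c cnt = some (bsLoop c x 0 m).toNat := by
  intro k
  induction k with
  | zero =>
    intro cnt hk hcnt
    obtain ⟨h0, hm', _, _⟩ := bs_spec0 c hs x hm0 hml
    have hcm : (cnt : Int) = m := by omega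
    rw [abInner]
    simp only [if_pos hcm]
    congr 1
    omega
  | succ k ih =>
    intro cnt hk hcnt
    obtain ⟨h0, hm', P1, P2⟩ := bs_spec0 c hs x hm0 hml
    rw [abInner]
    by_cases hcm : (cnt : Int) = m
    · simp only [if_pos hcm]
      congr 1
      omega
    · simp only [if_neg hcm]
      have hclen : cnt < c.length := by omega
      rw [pyGet?_of_lt hclen]
      by_cases hc : x ≤ gel c cnt
      · simp only [if_pos hc]
        have hr : bsLoop c x 0 m ≤ (cnt : Int) := by
          by_contra hcon
          push_neg at hcon
          exact absurd (P1 cnt hcon) (by omega)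
        congr 1
        omega
      · simp only [if_neg hc]
        push_neg at hc
        have hr : (cnt : Int) + 1 ≤ bsLoop c x 0 m := by
          by_contra hcon
          push_neg at hcon
          exact absurd (P2 cnt (by omega) (by omega)) (by omega)
        exact ih (cnt + 1) (by omega) (by push_cast; omega)

-- the cnt cursor of A at the start of iteration k
def cKAux (c : List Int) (m : Int) (a' : List Int) : Nat → Nat
  | 0 => 0
  | Nat.succ j => (bsLoop c (gel a' j) 0 m).toNat

theorem fold_eq (a' c : List Int) (m : Int)
    (hsa : List.Pairwise (· ≤ ·) a') (hsc : List.Pairwise (· ≤ ·) c)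
    (hm0 : 0 ≤ m) (hml : m ≤ (c.length : Int)) :
    ∀ k : Nat, k ≤ a'.length →
      (PySem.List.pyRange 0 (k : Int)).foldl
          (fun st i => st.bind (fun cp =>
            match PySem.List.pyGet? a' i with
            | none => none
            | some ai => (abInner m ai c cp.1).map (fun cc => (cc, cp.2 + (cc : Int)))))
          (some ((0 : Nat), (0 : Int))) =
        some (cKAux c m a' k,
          (PySem.List.pyRange 0 (k : Int)).foldl
            (fun pair i => pair + bsLoop c ((PySem.List.pyGet? a' i).getD 0) 0 m) 0) := by
  intro k
  induction k with
  | zero =>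
    simp [cKAux, show ((0 : Nat) : Int) = 0 from rfl, PySem.List.pyRange_zero_natCast]
  | succ k ih =>
    intro hk
    have hcast : ((k + 1 : Nat) : Int) = (k : Int) + 1 := by push_cast; ring
    rw [hcast, PySem.List.pyRange_one_succ_right (by positivity), List.foldl_append,
      List.foldl_append, ih (by omega)]
    have hklen : k < a'.length := by omega
    have hget : PySem.List.pyGet? a' ((k : Nat) : Int) = some (gel a' k) := pyGet?_of_lt hklen
    obtain ⟨hr0, hrm, _, _⟩ := bs_spec0 c hsc (gel a' k) hm0 hml
    have hcnt : ((cKAux c m a' k : Nat) : Int) ≤ bsLoop c (gel a' k) 0 m := by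
      cases k with
      | zero => simpa [cKAux] using hr0
      | succ j =>
        have hj : gel a' j ≤ gel a' (j + 1) := gel_mono hsa (by omega) hklen
        have hmono := bs_mono c hsc hm0 hml hj
        obtain ⟨hr0', _, _, _⟩ := bs_spec0 c hsc (gel a' j) hm0 hml
        simp only [cKAux]
        omega
    have hinner := inner_eq c hsc hm0 hml (gel a' k) (m.toNat - cKAux c m a' k)
      (cKAux c m a' k) le_rfl hcnt
    have hrt : (((bsLoop c (gel a' k) 0 m).toNat : Nat) : Int) = bsLoop c (gel a' k) 0 m :=
      Int.toNat_of_nonneg hr0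
    simp only [List.foldl_cons, List.foldl_nil, Option.bind_some, hget, hinner, Option.map_some,
      Option.getD_some]
    rw [show cKAux c m a' (k + 1) = (bsLoop c (gel a' k) 0 m).toNat from rfl, hrt]

-- ===== VERDICT (by name: the statement is the Claim_ definition above) =====
theorem ab_pair_spec : Claim_equal_ab_pair := by
  intro n m a b _hdom hpre
  obtain ⟨hna, hmb⟩ := hpre
  unfold Spec_ab_pair ab_pair ab_pair_alt
  by_cases hn : 0 < n
  · obtain ⟨hm0, hmlb⟩ := hmb hn
    have hlen_a : (PySem.List.sorted a (fun x => x)).length = a.length :=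
      PySem.List.length_sorted a (fun x => x) false
    have hlen_b : (PySem.List.sorted b (fun x => x)).length = b.length :=
      PySem.List.length_sorted b (fun x => x) false
    have hsa : List.Pairwise (· ≤ ·) (PySem.List.sorted a (fun x => x)) :=
      PySem.List.sorted_pairwise a (fun x => x)
    have hsb : List.Pairwise (· ≤ ·) (PySem.List.sorted b (fun x => x)) :=
      PySem.List.sorted_pairwise b (fun x => x)
    have hn' : n = ((n.toNat : Nat) : Int) := (Int.toNat_of_nonneg (le_of_lt hn)).symm
    rw [hn']
    rw [fold_eq (PySem.List.sorted a (fun x => x)) (PySem.List.sorted b (fun x => x)) m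
      hsa hsb hm0 (by omega) n.toNat (by omega)]
  · have hnil : PySem.List.pyRange 0 n = [] := by
      simp [PySem.List.pyRange]; omega
    rw [hnil]
    simp
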